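-- pv_equiv track=rewrite | github.com/joinwell52-AI/codeflow-pwa | src/bridgeflow/desktop/runner.py | _apply_progress
-- ===== SOURCE A (Python) =====
-- def _apply_progress(entries: list[dict[str, str]], admin_sender: str) -> list[dict[str, str]]:
--     by_thread: dict[str, list[dict[str, str]]] = {}
--     for entry in entries:
--         thread_key = entry.get("thread_key", "")
--         by_thread.setdefault(thread_key, []).append(entry)
--
--     for entry in entries:
--         thread_entries = by_thread.get(entry.get("thread_key", ""), [])
--         if any(item.get("recipient", "").upper() == admin_sender.upper() for item in thread_entries):
--             progress = "已回复"
--         elif any(item.get("sender", "").upper() != admin_sender.upper() for item in thread_entries):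
--             progress = "处理中"
--         else:
--             progress = "待处理"
--         entry["progress"] = progress
--     return entries
-- ===== SOURCE B (Python) =====
-- def _apply_progress(entries: list[dict[str, str]], admin_sender: str) -> list[dict[str, str]]:
--     by_thread: dict[str, list[dict[str, str]]] = {}
--     for entry in entries:
--         by_thread.setdefault(entry.get("thread_key", ""), []).append(entry)
--
--     admin = admin_sender.upper()
--     status: dict[str, str] = {}
--     for key, group in by_thread.items():
--         if any(item.get("recipient", "").upper() == admin for item in group):
--             status[key] = "已回复"
--         elif any(item.get("sender", "").upper() != admin for item in group):
--             status[key] = "处理中"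
--         else:
--             status[key] = "待处理"
--
--     for entry in entries:
--         entry["progress"] = status.get(entry.get("thread_key", ""), "待处理")
--     return entries
-- ===== Notes on version B (the rewrite author's own statement) =====
-- stated objective: faster
-- what changed: B computes each thread's progress status once per group (into a status dict) instead of recomputing the any()-scans over the whole group for every entry, then assigns per entry by dict lookup.
import Mathlib
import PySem

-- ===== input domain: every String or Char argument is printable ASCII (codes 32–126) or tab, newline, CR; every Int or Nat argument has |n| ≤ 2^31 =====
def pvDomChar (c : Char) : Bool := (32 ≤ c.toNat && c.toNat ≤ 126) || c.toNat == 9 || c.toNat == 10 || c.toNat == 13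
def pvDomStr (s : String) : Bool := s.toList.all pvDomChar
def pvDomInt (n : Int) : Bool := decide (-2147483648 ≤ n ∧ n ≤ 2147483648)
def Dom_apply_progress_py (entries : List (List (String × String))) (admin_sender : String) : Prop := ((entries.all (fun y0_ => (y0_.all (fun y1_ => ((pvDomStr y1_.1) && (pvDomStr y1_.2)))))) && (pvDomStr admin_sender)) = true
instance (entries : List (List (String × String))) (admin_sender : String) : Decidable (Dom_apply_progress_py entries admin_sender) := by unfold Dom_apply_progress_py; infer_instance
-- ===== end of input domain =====

-- B computes each thread's status once per group into a status dict instead of re-scanning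
-- the group for every entry (objective: faster). Both A and B mutate the entry dicts in
-- place in Python; the equivalence proved here is about the returned value.


-- ===== PORT A =====
-- by_thread.setdefault(k, []).append(entry)  =  modify k [] (· ++ [entry])
def pvGroupA (entries : List (List (String × String))) :
    PySem.Dict String (List (List (String × String))) :=
  entries.foldl
    (fun d e => d.modify ((PySem.Dict.mk e).getD "thread_key" "") [] (· ++ [e]))
    PySem.Dict.empty

-- the if/elif/else choosing the progress string for a thread's entries
def pvStatusA (admin_sender : String) (thread_entries : List (List (String × String))) : String :=
  if thread_entries.any
      (fun item => PySem.Str.upper ((PySem.Dict.mk item).getD "recipient" "")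
                     == PySem.Str.upper admin_sender) then "已回复"
  else if thread_entries.any
      (fun item => PySem.Str.upper ((PySem.Dict.mk item).getD "sender" "")
                     != PySem.Str.upper admin_sender) then "处理中"
  else "待处理"

-- the second loop mutates each entry once (entry["progress"] = progress); the predicates read
-- only "recipient"/"sender", never "progress", so the functional model by map is exact
def apply_progress_py (entries : List (List (String × String))) (admin_sender : String) :
    List (List (String × String)) :=
  let by_thread := pvGroupA entries
  entries.map (fun e =>
    let thread_entries := by_thread.getD ((PySem.Dict.mk e).getD "thread_key" "") []
    let progress := pvStatusA admin_sender thread_entries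
    ((PySem.Dict.mk e).insert "progress" progress).items)

-- ===== PORT B =====
def pvStatusB (admin : String) (group : List (List (String × String))) : String :=
  if group.any
      (fun item => PySem.Str.upper ((PySem.Dict.mk item).getD "recipient" "") == admin) then "已回复"
  else if group.any
      (fun item => PySem.Str.upper ((PySem.Dict.mk item).getD "sender" "") != admin) then "处理中"
  else "待处理"

-- last loop mutates each entry once; modelled by map, as in A's port
def apply_progress_py_alt (entries : List (List (String × String))) (admin_sender : String) :
    List (List (String × String)) :=
  let by_thread := entries.foldl
    (fun d e => d.modify ((PySem.Dict.mk e).getD "thread_key" "") [] (· ++ [e]))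
    PySem.Dict.empty
  let admin := PySem.Str.upper admin_sender
  let status := by_thread.items.foldl
    (fun s p => s.insert p.1 (pvStatusB admin p.2)) PySem.Dict.empty
  entries.map (fun e =>
    ((PySem.Dict.mk e).insert "progress"
        (status.getD ((PySem.Dict.mk e).getD "thread_key" "") "待处理")).items)

-- ===== PRECONDITION & SPEC =====
def Spec_apply_progress_py (entries : List (List (String × String))) (admin_sender : String) (out : List (List (String × String))) : Prop := out = apply_progress_py_alt entries admin_sender
instance (entries : List (List (String × String))) (admin_sender : String) (out : List (List (String × String))) : Decidable (Spec_apply_progress_py entries admin_sender out) := by unfold Spec_apply_progress_py; infer_instance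

-- ===== CLAIM (what is proved, stated in full; the proofs are below) =====
def Claim_equal_apply_progress_py : Prop := ∀ (entries : List (List (String × String))) (admin_sender : String), Dom_apply_progress_py entries admin_sender → Spec_apply_progress_py entries admin_sender (apply_progress_py entries admin_sender)

-- ===== LEMMAS AND PROOFS =====

-- keys not touched by the fold keep their lookup
theorem getD_foldl_insert_of_not_mem {κ ν α : Type} [BEq κ] [LawfulBEq κ]
    (f : κ × α → ν) (l : List (κ × α)) (s : PySem.Dict κ ν) (k : κ) (d0 : ν)
    (hk : k ∉ l.map (·.1)) :
    (l.foldl (fun s p => s.insert p.1 (f p)) s).getD k d0 = s.getD k d0 := by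
  induction l generalizing s with
  | nil => rfl
  | cons a t ih =>
    simp only [List.map_cons, List.mem_cons, not_or] at hk
    simp only [List.foldl_cons]
    rw [ih _ hk.2, PySem.Dict.getD_insert_of_ne s (f a) d0 hk.1]

-- a fold of inserts over pairs with distinct keys: lookup at a listed key gives f of that pair
theorem getD_foldl_insert_of_mem {κ ν α : Type} [BEq κ] [LawfulBEq κ]
    (f : κ × α → ν) (l : List (κ × α)) (s : PySem.Dict κ ν) (k : κ) (g : α) (d0 : ν)
    (hnd : (l.map (·.1)).Nodup) (hm : (k, g) ∈ l) :
    (l.foldl (fun s p => s.insert p.1 (f p)) s).getD k d0 = f (k, g) := by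
  induction l generalizing s with
  | nil => cases hm
  | cons a t ih =>
    simp only [List.map_cons, List.nodup_cons] at hnd
    simp only [List.foldl_cons]
    rcases List.mem_cons.mp hm with h | h
    · subst h
      rw [getD_foldl_insert_of_not_mem _ _ _ _ _ hnd.1, PySem.Dict.getD_insert_self]
    · exact ih _ hnd.2 h

-- every entry's thread key is a key of the grouping dict
theorem key_mem_group_keys (entries : List (List (String × String)))
    (e : List (String × String)) (he : e ∈ entries) :
    (PySem.Dict.mk e).getD "thread_key" "" ∈ (pvGroupA entries).keys := by
  unfold pvGroupA
  rw [PySem.Dict.keys_foldl_modify_key]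
  simp only [PySem.Dict.keys_empty, PySem.Set.update_nil_left, PySem.Set.mem_ofList]
  exact List.mem_map_of_mem he

theorem group_keys_nodup (entries : List (List (String × String))) :
    (pvGroupA entries).keys.Nodup :=
  PySem.Dict.nodup_keys_foldl_modify_key _ _ _ _ _ PySem.Dict.nodup_keys_empty

-- statuses agree once admin_sender.upper() is shared
theorem status_eq (admin_sender : String) (g : List (List (String × String))) :
    pvStatusA admin_sender g = pvStatusB (PySem.Str.upper admin_sender) g := rfl

-- ===== VERDICT (by name: the statement is the Claim_ definition above) =====
theorem apply_progress_py_spec : Claim_equal_apply_progress_py := by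
  intro entries admin_sender _
  unfold Spec_apply_progress_py apply_progress_py apply_progress_py_alt
  apply List.map_congr_left
  intro e he
  have hbt : pvGroupA entries = entries.foldl
      (fun d e => d.modify ((PySem.Dict.mk e).getD "thread_key" "") [] (· ++ [e]))
      PySem.Dict.empty := rfl
  set by_thread := pvGroupA entries with hset
  set k := (PySem.Dict.mk e).getD "thread_key" "" with hk
  -- k is a key of by_thread, so by_thread.get? k = some g for some group g
  have hkmem : k ∈ by_thread.keys := key_mem_group_keys entries e he
  obtain ⟨g, hg⟩ : ∃ g, by_thread.get? k = some g := by
    cases hget : by_thread.get? k with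
    | none => exact absurd ((PySem.Dict.get?_eq_none_iff_not_mem_keys _ _).mp hget) (by simp [hkmem])
    | some g => exact ⟨g, rfl⟩
  have hitems : (k, g) ∈ by_thread.items := PySem.Dict.mem_items_of_get?_eq_some _ hg
  have hnd : by_thread.keys.Nodup := group_keys_nodup entries
  have h1 : by_thread.getD k [] = g := PySem.Dict.getD_of_get?_eq_some _ _ hg
  have h2 : (by_thread.items.foldl
      (fun s p => s.insert p.1 (pvStatusB (PySem.Str.upper admin_sender) p.2))
      PySem.Dict.empty).getD k "待处理" = pvStatusB (PySem.Str.upper admin_sender) g := by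
    exact getD_foldl_insert_of_mem (fun p => pvStatusB (PySem.Str.upper admin_sender) p.2)
      by_thread.items PySem.Dict.empty k g "待处理" hnd hitems
  simp only [← hbt, h1, h2, status_eq]
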